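-- pv_equiv track=rewrite | github.com/Kencho5/Tene-Back | scripts/import_data.py | strip_color_suffix
-- ===== SOURCE A (Python) =====
-- def strip_color_suffix(title):
--     """Strip trailing color name from product title to find the base product name."""
--     color_words = [
--         'white', 'black', 'blue', 'red', 'green', 'grey', 'gray', 'gold',
--         'silver', 'pink', 'purple', 'yellow', 'orange', 'brown', 'coral',
--         'midnight', 'navy', 'teal', 'olive', 'beige', 'turquoise', 'lime',
--         'cyan', 'magenta', 'graphite', 'starlight', 'sierra', 'alpine',
--         'space gray', 'space grey',
--     ]
--     lower = title.lower().strip()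
--     for cw in sorted(color_words, key=len, reverse=True):
--         if lower.endswith(cw):
--             return title[:len(title) - len(cw)].strip().rstrip(' -/')
--     return title
-- ===== SOURCE B (Python) =====
-- COLOR_WORDS = [
--     'white', 'black', 'blue', 'red', 'green', 'grey', 'gray', 'gold',
--     'silver', 'pink', 'purple', 'yellow', 'orange', 'brown', 'coral',
--     'midnight', 'navy', 'teal', 'olive', 'beige', 'turquoise', 'lime',
--     'cyan', 'magenta', 'graphite', 'starlight', 'sierra', 'alpine',
--     'space gray', 'space grey',
-- ]
--
--
-- def strip_color_suffix(title):
--     """Strip trailing color name from product title to find the base product name."""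
--     lower = title.lower().strip()
--     best = 0
--     for cw in COLOR_WORDS:
--         if len(cw) > best and lower.endswith(cw):
--             best = len(cw)
--     if best:
--         return title[:len(title) - best].strip().rstrip(' -/')
--     return title
-- ===== Notes on version B (the rewrite author's own statement) =====
-- stated objective: alternative
-- what changed: Instead of sorting the 30 color words by length and returning at the first endswith match, B makes one unordered pass over the word list keeping the maximum length of any matching word, then slices once; this is correct because A's post-processing depends only on the matched word's length and the length-descending sort makes A's first match exactly the longest match.
import Mathlib
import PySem

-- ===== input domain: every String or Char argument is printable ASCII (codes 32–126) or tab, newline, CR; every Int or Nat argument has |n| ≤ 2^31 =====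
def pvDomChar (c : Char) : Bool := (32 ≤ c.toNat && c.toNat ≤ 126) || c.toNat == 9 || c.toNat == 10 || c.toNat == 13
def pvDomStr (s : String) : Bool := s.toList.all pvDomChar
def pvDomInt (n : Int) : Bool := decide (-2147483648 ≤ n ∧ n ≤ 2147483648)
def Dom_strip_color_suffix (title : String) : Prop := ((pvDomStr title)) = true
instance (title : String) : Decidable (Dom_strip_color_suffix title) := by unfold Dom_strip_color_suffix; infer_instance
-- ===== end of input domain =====

-- B replaces A's sort-by-length-then-first-endswith-match scan by a single unordered
-- pass computing the MAXIMUM length of a matching color word, then one slice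
-- (objective: alternative decomposition; both agree on every input).

-- ===== PORT A =====
def pvColorWordsA : List String :=
  ["white", "black", "blue", "red", "green", "grey", "gray", "gold",
   "silver", "pink", "purple", "yellow", "orange", "brown", "coral",
   "midnight", "navy", "teal", "olive", "beige", "turquoise", "lime",
   "cyan", "magenta", "graphite", "starlight", "sierra", "alpine",
   "space gray", "space grey"]

-- s.rstrip(' -/') ported by hand (exact on every string): drop trailing ' ', '-', '/'
def pvRstripA (s : String) : String :=
  String.ofList ((s.toList.reverse.dropWhile (fun c => c == ' ' || c == '-' || c == '/')).reverse)

-- title[:len(title) - len(cw)].strip().rstrip(' -/')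
def pvPostA (title : String) (k : Int) : String :=
  pvRstripA (PySem.Str.strip (PySem.Str.slice title none (some (PySem.Str.len title - k))))

def pvLoopA (title lower : String) : List String → String
  | [] => title
  | cw :: rest =>
      if PySem.Str.endswith lower cw then pvPostA title (PySem.Str.len cw)
      else pvLoopA title lower rest

def strip_color_suffix (title : String) : String :=
  pvLoopA title (PySem.Str.strip (PySem.Str.lower title))
    (PySem.List.sorted pvColorWordsA (fun w => PySem.Str.len w) true)

-- ===== PORT B =====
def pvColorWordsB : List String :=
  ["white", "black", "blue", "red", "green", "grey", "gray", "gold",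
   "silver", "pink", "purple", "yellow", "orange", "brown", "coral",
   "midnight", "navy", "teal", "olive", "beige", "turquoise", "lime",
   "cyan", "magenta", "graphite", "starlight", "sierra", "alpine",
   "space gray", "space grey"]

-- the body of B's for-loop: best = len(cw) if len(cw) > best and lower.endswith(cw)
def pvStepB (lower : String) (best : Int) (cw : String) : Int :=
  if decide (PySem.Str.len cw > best) && PySem.Str.endswith lower cw then PySem.Str.len cw
  else best

def strip_color_suffix_alt (title : String) : String :=
  let lower := PySem.Str.strip (PySem.Str.lower title)
  let best := pvColorWordsB.foldl (pvStepB lower) 0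
  if best ≠ 0 then
    -- title[:len(title) - best].strip().rstrip(' -/'); rstrip via List.rdropWhile
    String.ofList
      ((PySem.Str.strip (PySem.Str.slice title none (some (PySem.Str.len title - best)))).toList.rdropWhile
        (fun c => c == ' ' || c == '-' || c == '/'))
  else title

-- ===== PRECONDITION & SPEC =====
def Spec_strip_color_suffix (title : String) (out : String) : Prop := out = strip_color_suffix_alt title
instance (title : String) (out : String) : Decidable (Spec_strip_color_suffix title out) := by unfold Spec_strip_color_suffix; infer_instance

-- ===== CLAIM (what is proved, stated in full; the proofs are below) =====
def Claim_equal_strip_color_suffix : Prop := ∀ (title : String), Dom_strip_color_suffix title → Spec_strip_color_suffix title (strip_color_suffix title)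

-- ===== LEMMAS AND PROOFS =====

-- B's post-processing (rdropWhile) is A's post-processing (reverse/dropWhile/reverse)
lemma pv_post_eq (title : String) (k : Int) :
    String.ofList
      ((PySem.Str.strip (PySem.Str.slice title none (some (PySem.Str.len title - k)))).toList.rdropWhile
        (fun c => c == ' ' || c == '-' || c == '/')) = pvPostA title k := by
  simp [pvPostA, pvRstripA, List.rdropWhile]

-- pvStepB is right-commutative (B's fold computes a max, so order is irrelevant)
lemma pv_stepB_comm (lower : String) (b : Int) (w₁ w₂ : String) :
    pvStepB lower (pvStepB lower b w₁) w₂ = pvStepB lower (pvStepB lower b w₂) w₁ := by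
  simp only [pvStepB]
  by_cases h₁ : PySem.Str.endswith lower w₁ = true
  · by_cases h₂ : PySem.Str.endswith lower w₂ = true
    · simp only [h₁, h₂, Bool.and_true, decide_eq_true_eq]
      split_ifs <;> omega
    · simp only [Bool.not_eq_true] at h₂
      simp only [h₁, h₂, Bool.and_true, Bool.and_false, if_false, Bool.false_eq_true]
  · simp only [Bool.not_eq_true] at h₁
    by_cases h₂ : PySem.Str.endswith lower w₂ = true
    · simp only [h₁, h₂, Bool.and_true, Bool.and_false, if_false, Bool.false_eq_true]
    · simp only [h₁, h₂, Bool.and_false, if_false, Bool.false_eq_true]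

-- the fold leaves best unchanged over words no longer than best
lemma pv_foldB_const (lower : String) (b : Int) (ws : List String)
    (h : ∀ w ∈ ws, PySem.Str.len w ≤ b) :
    ws.foldl (pvStepB lower) b = b := by
  induction ws with
  | nil => rfl
  | cons w ws ih =>
    have hw := h w (List.mem_cons_self ..)
    simp only [List.foldl_cons, pvStepB]
    rw [if_neg (by simp only [Bool.and_eq_true, decide_eq_true_eq]; rintro ⟨h, -⟩; exact absurd hw (not_le.mpr h))]
    exact ih (fun w hw => h w (List.mem_cons_of_mem _ hw))

-- over a block of words all of length k > 0, starting from 0 the fold yields k iff some word matches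
lemma pv_foldB_level (lower : String) (k : Int) (hk : 0 < k) (ws : List String)
    (h : ∀ w ∈ ws, PySem.Str.len w = k) :
    ws.foldl (pvStepB lower) 0 =
      if ws.any (fun w => PySem.Str.endswith lower w) then k else 0 := by
  induction ws with
  | nil => rfl
  | cons w ws ih =>
    have hw := h w (List.mem_cons_self ..)
    have hrest : ∀ w ∈ ws, PySem.Str.len w = k := fun w hw => h w (List.mem_cons_of_mem _ hw)
    by_cases hm : PySem.Str.endswith lower w
    · simp only [List.foldl_cons, pvStepB, hw, hm, Bool.and_true, List.any_cons, Bool.true_or,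
        if_true, decide_eq_true_eq]
      rw [if_pos hk, pv_foldB_const lower k ws (fun w hw => le_of_eq (hrest w hw))]
    · simp only [List.foldl_cons, pvStepB, hm, Bool.and_false, Bool.false_eq_true, if_false,
        List.any_cons, Bool.false_or]
      exact ih hrest

-- A's scan of a block of equal-length words is one any-test
lemma pv_loopA_block (title lower : String) (k : Int) (ws rest : List String)
    (hlen : ∀ w ∈ ws, PySem.Str.len w = k) :
    pvLoopA title lower (ws ++ rest) =
      if ws.any (fun w => PySem.Str.endswith lower w) then pvPostA title k
      else pvLoopA title lower rest := by
  induction ws with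
  | nil => simp
  | cons w ws ih =>
    by_cases h : PySem.Str.endswith lower w
    · have hk := hlen w (List.mem_cons_self ..)
      simp only [List.cons_append, pvLoopA, List.any_cons, h, Bool.true_or, if_true, hk]
    · simp only [List.cons_append, pvLoopA, List.any_cons, h, Bool.false_or,
        Bool.false_eq_true, if_false]
      exact ih (fun w hw => hlen w (List.mem_cons_of_mem _ hw))

-- the chained invariant: A's remaining scan equals B's fold of the remaining words
lemma pv_level_eq (title lower : String) (k : Int) (hk : 0 < k) (ws rest : List String)
    (hws : ∀ w ∈ ws, PySem.Str.len w = k)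
    (hrest : ∀ w ∈ rest, PySem.Str.len w < k)
    (ih : pvLoopA title lower rest =
      (if rest.foldl (pvStepB lower) 0 ≠ 0 then pvPostA title (rest.foldl (pvStepB lower) 0)
       else title)) :
    pvLoopA title lower (ws ++ rest) =
      (if (ws ++ rest).foldl (pvStepB lower) 0 ≠ 0
       then pvPostA title ((ws ++ rest).foldl (pvStepB lower) 0) else title) := by
  rw [pv_loopA_block title lower k ws rest hws, List.foldl_append,
    pv_foldB_level lower k hk ws hws]
  by_cases hany : ws.any (fun w => PySem.Str.endswith lower w)
  · rw [if_pos hany, if_pos hany,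
      pv_foldB_const lower k rest (fun w hw => le_of_lt (hrest w hw)),
      if_pos (by omega)]
  · rw [if_neg hany, if_neg hany, ih]

-- the length-sorted color list, written as its blocks of equal-length words
def pvGrouped : List String :=
  ["space gray", "space grey"] ++ (["turquoise", "starlight"] ++
  (["midnight", "graphite"] ++ (["magenta"] ++
  (["silver", "purple", "yellow", "orange", "sierra", "alpine"] ++
  (["white", "black", "green", "brown", "coral", "olive", "beige"] ++
  (["blue", "grey", "gray", "gold", "pink", "navy", "teal", "lime", "cyan"] ++
  (["red"] ++ ([] : List String))))))))

lemma pv_key (title lower : String) :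
    pvLoopA title lower pvGrouped =
      (if pvGrouped.foldl (pvStepB lower) 0 ≠ 0
       then pvPostA title (pvGrouped.foldl (pvStepB lower) 0) else title) := by
  unfold pvGrouped
  apply pv_level_eq title lower 10 (by omega) _ _ (by decide) (by decide)
  apply pv_level_eq title lower 9 (by omega) _ _ (by decide) (by decide)
  apply pv_level_eq title lower 8 (by omega) _ _ (by decide) (by decide)
  apply pv_level_eq title lower 7 (by omega) _ _ (by decide) (by decide)
  apply pv_level_eq title lower 6 (by omega) _ _ (by decide) (by decide)
  apply pv_level_eq title lower 5 (by omega) _ _ (by decide) (by decide)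
  apply pv_level_eq title lower 4 (by omega) _ _ (by decide) (by decide)
  apply pv_level_eq title lower 3 (by omega) _ _ (by decide) (by decide)
  simp [pvLoopA]

theorem pv_main (title : String) : strip_color_suffix title = strip_color_suffix_alt title := by
  have hsort : PySem.List.sorted pvColorWordsA (fun w => PySem.Str.len w) true = pvGrouped := by
    decide
  have hperm : List.Perm pvColorWordsB pvGrouped := by decide
  have hfold := hperm.foldl_eq'
    (fun x _ y _ z => pv_stepB_comm (PySem.Str.strip (PySem.Str.lower title)) z x y) (0 : Int)
  calc strip_color_suffix title
      = pvLoopA title (PySem.Str.strip (PySem.Str.lower title)) pvGrouped := by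
        rw [strip_color_suffix, hsort]
    _ = strip_color_suffix_alt title := by
        rw [pv_key, strip_color_suffix_alt]
        rw [show (List.foldl (pvStepB (PySem.Str.strip (PySem.Str.lower title))) 0 pvColorWordsB)
              = pvGrouped.foldl (pvStepB (PySem.Str.strip (PySem.Str.lower title))) 0 from hfold]
        rw [pv_post_eq]

-- ===== VERDICT (by name: the statement is the Claim_ definition above) =====
theorem strip_color_suffix_spec : Claim_equal_strip_color_suffix := by
  intro title _
  unfold Spec_strip_color_suffix
  exact pv_main title
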